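-- pv_equiv track=rewrite | github.com/arpanauts/biomapper | biomapper/standardization/ramp_client.py | find_pathway_overlaps
-- ===== SOURCE A (Python) =====
-- from collections import defaultdict
-- from typing import Any, Dict, List, Optional
--
-- def find_pathway_overlaps(pathways_data: Dict) -> Dict[str, int]:
--     """Find pathways that are shared between analytes
--
--     Args:
--         pathways_data: Response from get_pathways_from_analytes()
--
--     Returns:
--         Dict mapping pathway names to number of analytes involved
--     """
--     if "result" not in pathways_data:
--         return {}
--
--     pathway_counts = defaultdict(set)
--
--     # Count analytes per pathway
--     for pathway in pathways_data["result"]: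
--         name = pathway["pathwayName"]
--         analyte_id = pathway["inputId"]
--         pathway_counts[name].add(analyte_id)
--
--     # Convert sets to counts
--     return {name: len(analytes) for name, analytes in pathway_counts.items()}
-- ===== SOURCE B (Python) =====
-- def find_pathway_overlaps(pathways_data):
--     """Count distinct analyte inputIds per pathwayName (same contract as A)."""
--     if "result" not in pathways_data:
--         return {}
--     pairs = [(p["pathwayName"], p["inputId"]) for p in pathways_data["result"]]
--     out = {}
--     for name, _ in pairs:
--         if name not in out:
--             out[name] = len({i for n, i in pairs if n == name})
--     return out
-- ===== Notes on version B (the rewrite author's own statement) =====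
-- stated objective: alternative
-- what changed: A buckets analyte ids into a defaultdict of sets in one hashed pass; B materialises the (name,id) pair list once and, at each first occurrence of a name, counts its distinct ids with a set-comprehension scan over the pairs - nested scans instead of hash-bucketing, no defaultdict and no second items() pass.
import Mathlib
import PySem

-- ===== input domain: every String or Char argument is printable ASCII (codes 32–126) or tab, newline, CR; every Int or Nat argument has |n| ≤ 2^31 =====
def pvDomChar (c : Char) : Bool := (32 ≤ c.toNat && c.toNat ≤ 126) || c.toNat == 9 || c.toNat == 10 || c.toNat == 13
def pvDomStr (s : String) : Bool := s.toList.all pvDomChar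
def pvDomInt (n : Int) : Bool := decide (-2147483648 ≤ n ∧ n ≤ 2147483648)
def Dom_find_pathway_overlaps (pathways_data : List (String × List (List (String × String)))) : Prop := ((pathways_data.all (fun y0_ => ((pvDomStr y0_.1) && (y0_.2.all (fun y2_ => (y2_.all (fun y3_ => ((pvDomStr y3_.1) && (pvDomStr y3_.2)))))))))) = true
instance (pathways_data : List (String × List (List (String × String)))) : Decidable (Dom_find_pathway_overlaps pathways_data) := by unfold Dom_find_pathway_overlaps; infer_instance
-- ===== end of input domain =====

-- B replaces A's defaultdict-of-sets hash bucketing by a pair list with a distinct-id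
-- counting scan at each first occurrence of a name (alternative decomposition, not faster).

-- ===== PORT A =====
-- Inside Pre_ (both row keys present) the Python lookups pathway["pathwayName"] /
-- pathway["inputId"] return; getD with "" is exact there (outside Pre_ Python raises KeyError).
def find_pathway_overlaps (pathways_data : List (String × List (List (String × String)))) : List (String × Int) :=
  match (PySem.Dict.mk pathways_data).get? "result" with
  | none => []
  | some rows =>
    let counts : PySem.Dict String (PySem.Set String) :=
      rows.foldl (fun d row =>
        d.modify (PySem.Dict.getD (PySem.Dict.mk row) "pathwayName" "") PySem.Set.empty
          (fun s => PySem.Set.add s (PySem.Dict.getD (PySem.Dict.mk row) "inputId" "")))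
        PySem.Dict.empty
    counts.items.map (fun p => (p.1, (p.2.length : Int)))

-- ===== PORT B =====
def find_pathway_overlaps_alt (pathways_data : List (String × List (List (String × String)))) : List (String × Int) :=
  match (PySem.Dict.mk pathways_data).get? "result" with
  | none => []
  | some rows =>
    let pairs : List (String × String) :=
      rows.map (fun p => (PySem.Dict.getD (PySem.Dict.mk p) "pathwayName" "",
                          PySem.Dict.getD (PySem.Dict.mk p) "inputId" ""))
    (pairs.foldl (fun out q =>
        if out.contains q.1 then out
        else out.insert q.1
          ((PySem.Set.ofList ((pairs.filter (fun r => r.1 == q.1)).map (fun r => r.2))).length : Int))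
      PySem.Dict.empty).items

-- ===== PRECONDITION & SPEC =====
-- Pre_ excludes exactly the inputs where the Python A raises KeyError: some row of
-- pathways_data["result"] missing the "pathwayName" or "inputId" key.
def Pre_find_pathway_overlaps (pathways_data : List (String × List (List (String × String)))) : Prop :=
  (((PySem.Dict.mk pathways_data).get? "result").all
    (fun rows => rows.all (fun row =>
      (PySem.Dict.mk row).contains "pathwayName" && (PySem.Dict.mk row).contains "inputId"))) = true
instance (pathways_data : List (String × List (List (String × String)))) : Decidable (Pre_find_pathway_overlaps pathways_data) := by unfold Pre_find_pathway_overlaps; infer_instance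

def pvWitness_find_pathway_overlaps : (List (String × List (List (String × String)))) :=
  [("result", [[("pathwayName", "P1"), ("inputId", "x")], [("pathwayName", "P1"), ("inputId", "y")]])]

def Spec_find_pathway_overlaps (pathways_data : List (String × List (List (String × String)))) (out : List (String × Int)) : Prop := out = find_pathway_overlaps_alt pathways_data
instance (pathways_data : List (String × List (List (String × String)))) (out : List (String × Int)) : Decidable (Spec_find_pathway_overlaps pathways_data out) := by unfold Spec_find_pathway_overlaps; infer_instance

-- ===== CLAIM (what is proved, stated in full; the proofs are below) =====
def Claim_equal_find_pathway_overlaps : Prop := ∀ (pathways_data : List (String × List (List (String × String)))), Dom_find_pathway_overlaps pathways_data → Pre_find_pathway_overlaps pathways_data → Spec_find_pathway_overlaps pathways_data (find_pathway_overlaps pathways_data)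

-- ===== LEMMAS AND PROOFS =====

-- items of a Nodup-keyed dict are its keys paired with their getD values
theorem pv_items_eq_keys_map {κ ν : Type} [BEq κ] [LawfulBEq κ] (d : PySem.Dict κ ν)
    (h : d.keys.Nodup) (d0 : ν) : d.items = d.keys.map (fun k => (k, d.getD k d0)) := by
  apply List.ext_getElem
  · simp [PySem.Dict.keys]
  · intro i h1 h2
    have hk : d.keys.length = d.items.length := by simp [PySem.Dict.keys]
    have hi : i < d.items.length := h1
    simp only [List.getElem_map]
    have hmem : (d.items[i].1, d.items[i].2) ∈ d.items := by
      simp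
    have := PySem.Dict.getD_of_mem_items d hmem h d0
    have hkeys : d.keys[i] = d.items[i].1 := by simp [PySem.Dict.keys]
    rw [hkeys, this]

-- the A-side group fold: value of the counts dict at a key
theorem pv_getD_group_fold (ps : List (String × String)) (d : PySem.Dict String (PySem.Set String)) (k : String) :
    (ps.foldl (fun d q => d.modify q.1 PySem.Set.empty (fun s => PySem.Set.add s q.2)) d).getD k PySem.Set.empty
      = List.foldl PySem.Set.add (d.getD k PySem.Set.empty) ((ps.filter (fun r => r.1 == k)).map (fun r => r.2)) := by
  induction ps generalizing d with
  | nil => simp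
  | cons q t ih =>
    simp only [List.foldl_cons, ih, List.filter_cons]
    by_cases hq : q.1 = k
    · simp [hq]
    · have h1 : (q.1 == k) = false := by simpa using hq
      have h2 : ¬ k = q.1 := fun h => hq h.symm
      simp [h1, PySem.Dict.getD_modify, h2]

-- List.foldl Set.add only appends to its accumulator
theorem pv_foldl_add_prefix {α : Type} [BEq α] (l : List α) :
    ∀ (s : PySem.Set α), ∃ t, List.foldl PySem.Set.add s l = s ++ t := by
  induction l with
  | nil => exact fun s => ⟨[], by simp⟩
  | cons x xs ih =>
    intro s
    by_cases h : PySem.Set.contains s x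
    · obtain ⟨t, ht⟩ := ih s
      exact ⟨t, by simp only [List.foldl_cons, PySem.Set.add, h, if_true]; exact ht⟩
    · obtain ⟨t, ht⟩ := ih (s ++ [x])
      refine ⟨x :: t, ?_⟩
      simp only [List.foldl_cons, PySem.Set.add, h, Bool.false_eq_true, if_false]
      rw [ht]; simp

-- the B-side first-occurrence fold produces the fresh names paired with c
theorem pv_foldl_first_occ (c : String → Int) (ps : List (String × String)) :
    ∀ (d : PySem.Dict String Int),
    (ps.foldl (fun out q => if out.contains q.1 then out else out.insert q.1 (c q.1)) d).items
      = d.items ++ ((List.foldl PySem.Set.add d.keys (ps.map (fun r => r.1))).drop d.keys.length).map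
          (fun n => (n, c n)) := by
  induction ps with
  | nil => simp
  | cons q t ih =>
    intro d
    simp only [List.foldl_cons, List.map_cons]
    by_cases h : d.contains q.1 = true
    · have hmem : q.1 ∈ d.keys := (PySem.Dict.contains_iff_mem_keys d q.1).mp h
      have hc : PySem.Set.contains d.keys q.1 = true := by
        simp only [PySem.Set.contains, List.contains_iff_mem]; exact hmem
      have hadd : PySem.Set.add d.keys q.1 = d.keys := by
        simp only [PySem.Set.add, hc, if_true]
      simp only [h, if_true, ih d, hadd]
    · have hne : d.contains q.1 = false := by simpa using h
      have hkeys := PySem.Dict.keys_insert_of_not_contains d (c q.1) hne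
      have hitems := PySem.Dict.items_insert_of_not_contains d (c q.1) hne
      have hnm : ¬ q.1 ∈ d.keys := fun hm => h ((PySem.Dict.contains_iff_mem_keys d q.1).mpr hm)
      have hc : PySem.Set.contains d.keys q.1 = false := by
        simp [PySem.Set.contains, hnm]
      have hadd : PySem.Set.add d.keys q.1 = d.keys ++ [q.1] := by
        simp only [PySem.Set.add, hc, Bool.false_eq_true, if_false]
      obtain ⟨u, hu⟩ := pv_foldl_add_prefix (t.map (fun r => r.1)) (d.keys ++ [q.1])
      simp only [hne, Bool.false_eq_true, if_false, ih (d.insert q.1 (c q.1)), hitems, hkeys, hadd, hu]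
      have h1 : List.drop d.keys.length (d.keys ++ [q.1] ++ u) = q.1 :: u := by
        rw [List.append_assoc, List.drop_left]; rfl
      have h2 : List.drop (d.keys ++ [q.1]).length (d.keys ++ [q.1] ++ u) = u :=
        List.drop_left
      rw [h1, h2]
      simp

-- ===== VERDICT (by name: the statement is the Claim_ definition above) =====
theorem find_pathway_overlaps_spec : Claim_equal_find_pathway_overlaps := by
  intro pd _ _
  unfold Spec_find_pathway_overlaps find_pathway_overlaps find_pathway_overlaps_alt
  cases hres : (PySem.Dict.mk pd).get? "result" with
  | none => rfl
  | some rows =>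
    simp only
    set pairs : List (String × String) :=
      rows.map (fun p => (PySem.Dict.getD (PySem.Dict.mk p) "pathwayName" "",
                          PySem.Dict.getD (PySem.Dict.mk p) "inputId" "")) with hpairs
    -- rewrite A's fold over rows as a fold over pairs
    have hfoldA :
        rows.foldl (fun d row =>
          d.modify (PySem.Dict.getD (PySem.Dict.mk row) "pathwayName" "") PySem.Set.empty
            (fun s => PySem.Set.add s (PySem.Dict.getD (PySem.Dict.mk row) "inputId" "")))
          PySem.Dict.empty
        = pairs.foldl (fun d q => d.modify q.1 PySem.Set.empty (fun s => PySem.Set.add s q.2))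
            PySem.Dict.empty := by
      rw [hpairs, List.foldl_map]
    rw [hfoldA]
    set counts := pairs.foldl (fun d q => d.modify q.1 PySem.Set.empty (fun s => PySem.Set.add s q.2))
        PySem.Dict.empty with hcounts
    have hnodup : counts.keys.Nodup := by
      rw [hcounts]
      exact PySem.Dict.nodup_keys_foldl_modify_key pairs (fun q => q.1) PySem.Set.empty
        (fun _ q s => PySem.Set.add s q.2) PySem.Dict.empty (by simp [PySem.Dict.keys_empty])
    have hkeys : counts.keys = PySem.Set.ofList (pairs.map (fun r => r.1)) := by
      rw [hcounts]
      rw [PySem.Dict.keys_foldl_modify_key pairs (fun q => q.1) PySem.Set.empty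
        (fun _ q s => PySem.Set.add s q.2) PySem.Dict.empty]
      simp [PySem.Dict.keys_empty, PySem.Set.update, PySem.Set.ofList_eq_foldl]
    -- A's result in canonical form
    rw [pv_items_eq_keys_map counts hnodup PySem.Set.empty]
    have hval : ∀ k, counts.getD k PySem.Set.empty
        = PySem.Set.ofList ((pairs.filter (fun r => r.1 == k)).map (fun r => r.2)) := by
      intro k
      rw [hcounts, pv_getD_group_fold]
      simp [PySem.Dict.getD_empty, PySem.Set.empty, PySem.Set.ofList_eq_foldl]
    -- B's result in canonical form
    rw [pv_foldl_first_occ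
      (fun n => ((PySem.Set.ofList ((pairs.filter (fun r => r.1 == n)).map (fun r => r.2))).length : Int))
      pairs PySem.Dict.empty]
    simp only [PySem.Dict.empty, List.nil_append, List.map_map, hkeys]
    rw [PySem.Set.ofList_eq_foldl]
    apply List.map_congr_left
    intro k _
    have hvk := hval k
    simp only [Function.comp_apply]
    exact congrArg (fun s => (k, (List.length s : Int))) hvk
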